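-- pv_equiv track=rewrite | github.com/Christian-Schefe/adventofcode2023 | day14/day14-2.py | do_move
-- ===== SOURCE A (Python) =====
-- def do_move(field, direc):
--     for _ in range(direc):
--         field = [[field[x][len(field) - y - 1] for x in range(len(line))] for y, line in enumerate(field)]
--
--     square_rocks = [(x, -1) for x in range(len(field[0]))] + [(x, y) for y, line in enumerate(field) for x, tile in enumerate(line) if tile == '#']
--     rock_counts = [0 for _ in square_rocks]
--
--     for i, pos in enumerate(square_rocks):
--         for y in range(1, len(field) + 1):
--             if pos[1] + y >= len(field):
--                 break
--             if field[pos[1] + y][pos[0]] == '#':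
--                 break
--             if field[pos[1] + y][pos[0]] == 'O':
--                 rock_counts[i] += 1
--
--     for i, pos in enumerate(square_rocks):
--         for y in range(1, len(field) + 1):
--             if pos[1] + y >= len(field):
--                 break
--             if field[pos[1] + y][pos[0]] == '#':
--                 break
--             field[pos[1] + y][pos[0]] = 'O' if y <= rock_counts[i] else '.'
--
--     for _ in range(4 - direc):
--         field = [[field[x][len(field) - y - 1] for x in range(len(line))] for y, line in enumerate(field)]
--
--     return field
-- ===== SOURCE B (Python) =====
-- def do_move(field, direc):
--     for _ in range(direc):
--         field = [[field[x][len(field) - y - 1] for x in range(len(line))] for y, line in enumerate(field)]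
--
--     # single column-wise sweep with a write pointer instead of anchor lists + two scan passes
--     for x in range(len(field[0])):
--         free = 0
--         for y in range(len(field)):
--             tile = field[y][x]
--             if tile == '#':
--                 free = y + 1
--             else:
--                 field[y][x] = '.'
--                 if tile == 'O':
--                     field[free][x] = 'O'
--                     free += 1
--
--     for _ in range(4 - direc):
--         field = [[field[x][len(field) - y - 1] for x in range(len(line))] for y, line in enumerate(field)]
--
--     return field
-- ===== Notes on version B (the rewrite author's own statement) =====
-- stated objective: simpler
-- what changed: The anchor-list machinery (square_rocks tuples, rock_counts, and the two separate count/place scan passes) is replaced by a single column-wise sweep with a write pointer: each column is traversed once, clearing cells and dropping each 'O' at the current free slot; the rotation comprehensions are kept verbatim.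
import Mathlib
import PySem

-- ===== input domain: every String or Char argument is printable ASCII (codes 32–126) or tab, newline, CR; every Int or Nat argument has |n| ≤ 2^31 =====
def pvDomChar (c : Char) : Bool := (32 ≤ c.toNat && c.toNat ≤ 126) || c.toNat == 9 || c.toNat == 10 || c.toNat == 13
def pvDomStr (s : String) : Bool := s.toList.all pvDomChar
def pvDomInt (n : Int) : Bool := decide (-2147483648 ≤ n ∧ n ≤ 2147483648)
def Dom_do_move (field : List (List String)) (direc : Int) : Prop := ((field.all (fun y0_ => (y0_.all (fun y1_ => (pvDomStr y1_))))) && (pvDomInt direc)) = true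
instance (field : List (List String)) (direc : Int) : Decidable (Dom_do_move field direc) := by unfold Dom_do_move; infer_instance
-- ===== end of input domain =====

-- B re-implements the tilt as one column-wise sweep with a write pointer instead of
-- A's anchor lists and two scan passes; equivalence is about the RETURN value only
-- (the Python originals also mutate the argument rows in place when direc <= 0).

-- Shared helpers: both Pythons contain the identical rotation comprehension and the
-- identical 2-D read/write idiom, so they are defined once here.
-- pvCell / pvSetCell are exact for the non-negative in-range indices that occur under Pre_.
def pvCell (F : List (List String)) (r c : Int) : String :=
  (PySem.List.pyGet? ((PySem.List.pyGet? F r).getD []) c).getD ""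

def pvSetCell (F : List (List String)) (r c : Int) (v : String) : List (List String) :=
  F.set r.toNat (((PySem.List.pyGet? F r).getD []).set c.toNat v)

-- [[field[x][len(field) - y - 1] for x in range(len(line))] for y, line in enumerate(field)]
def pvRot (F : List (List String)) : List (List String) :=
  (PySem.List.enumerate F 0).map (fun yl =>
    (PySem.List.pyRange 0 (yl.2.length : Int) 1).map (fun x =>
      pvCell F x ((F.length : Int) - yl.1 - 1)))

-- for _ in range(k): field = <rotation>
def pvRots (F : List (List String)) (k : Int) : List (List String) :=
  (PySem.List.pyRange 0 k 1).foldl (fun G _ => pvRot G) F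

-- ===== PORT A =====
-- inner 'for y in range(1, len(field)+1)' of the counting pass, with its two breaks
def pvCountLoop (F : List (List String)) (n : Int) (pos : Int × Int) :
    List Int → Int → Int
  | [], acc => acc
  | y :: ys, acc =>
    if n ≤ pos.2 + y then acc
    else if pvCell F (pos.2 + y) pos.1 = "#" then acc
    else pvCountLoop F n pos ys (if pvCell F (pos.2 + y) pos.1 = "O" then acc + 1 else acc)

-- inner 'for y in range(1, len(field)+1)' of the writing pass, with its two breaks
def pvWriteLoop (n : Int) (pos : Int × Int) (cnt : Int) :
    List Int → List (List String) → List (List String)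
  | [], F => F
  | y :: ys, F =>
    if n ≤ pos.2 + y then F
    else if pvCell F (pos.2 + y) pos.1 = "#" then F
    else pvWriteLoop n pos cnt ys
      (pvSetCell F (pos.2 + y) pos.1 (if y ≤ cnt then "O" else "."))

def do_move (field : List (List String)) (direc : Int) : List (List String) :=
  let F := pvRots field direc
  let n : Int := (F.length : Int)
  let square_rocks : List (Int × Int) :=
    (PySem.List.pyRange 0 ((((PySem.List.pyGet? F 0).getD []).length : Int)) 1).map
        (fun x => (x, (-1 : Int)))
      ++ (PySem.List.enumerate F 0).flatMap (fun yl =>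
           (PySem.List.enumerate yl.2 0).filterMap (fun xt =>
             if xt.2 = "#" then some (xt.1, yl.1) else none))
  let rock_counts : List Int :=
    square_rocks.map (fun pos => pvCountLoop F n pos (PySem.List.pyRange 1 (n + 1) 1) 0)
  let F2 := (square_rocks.zip rock_counts).foldl
      (fun G pc => pvWriteLoop n pc.1 pc.2 (PySem.List.pyRange 1 (n + 1) 1) G) F
  pvRots F2 (4 - direc)

-- ===== PORT B =====
def do_move_alt (field : List (List String)) (direc : Int) : List (List String) :=
  let F := pvRots field direc
  let F2 := (PySem.List.pyRange 0 ((((PySem.List.pyGet? F 0).getD []).length : Int)) 1).foldl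
    (fun G x =>
      ((PySem.List.pyRange 0 ((G.length : Int)) 1).foldl
        (fun s y =>
          let tile := pvCell s.1 y x
          if tile = "#" then (s.1, y + 1)
          else
            let G' := pvSetCell s.1 y x "."
            if tile = "O" then (pvSetCell G' s.2 x "O", s.2 + 1) else (G', s.2))
        (G, (0 : Int))).1)
    F
  pvRots F2 (4 - direc)

-- ===== PRECONDITION & SPEC =====
-- Pre_ excludes the grids on which A's rotation comprehension raises IndexError:
-- the empty grid and ragged grids; what remains (and what A is meant for) are the
-- non-empty square grids, plus grids all of whose rows are empty, on which A also
-- returns normally.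
def Pre_do_move (field : List (List String)) (direc : Int) : Prop :=
  field ≠ [] ∧
    ((∀ row ∈ field, row = ([] : List String)) ∨
     (∀ row ∈ field, row.length = field.length))

instance (field : List (List String)) (direc : Int) : Decidable (Pre_do_move field direc) := by
  unfold Pre_do_move; infer_instance

def pvWitness_do_move : List (List String) × Int :=
  ([["O", ".", "#"], [".", "O", "O"], ["#", ".", "O"]], 1)

def Spec_do_move (field : List (List String)) (direc : Int) (out : List (List String)) : Prop :=
  out = do_move_alt field direc
instance (field : List (List String)) (direc : Int) (out : List (List String)) :
    Decidable (Spec_do_move field direc out) := by unfold Spec_do_move; infer_instance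

-- ===== CLAIM (what is proved, stated in full; the proofs are below) =====
def Claim_equal_do_move : Prop :=
  ∀ (field : List (List String)) (direc : Int),
    Dom_do_move field direc → Pre_do_move field direc →
      Spec_do_move field direc (do_move field direc)

-- ===== LEMMAS AND PROOFS =====

-- ---------- Part I : the column-normalization function and its algebra ----------

def pvNH (t : String) : Bool := t ≠ "#"

def countO (l : List String) : Nat := l.countP (fun t => t == "O")

def normSeg (l : List String) : List String :=
  List.replicate (countO l) "O" ++ List.replicate (l.length - countO l) "."

def tcol : List String → List String
  | [] => []
  | t :: rest =>
    if t = "#" then "#" :: tcol rest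
    else normSeg (t :: rest.takeWhile pvNH) ++ tcol (rest.dropWhile pvNH)
termination_by l => l.length
decreasing_by
  · simp
  · exact Nat.lt_succ_of_le (rest.length_dropWhile_le pvNH)


theorem tcol_nil : tcol [] = [] := by rw [tcol]

theorem tcol_hash (rest : List String) : tcol ("#" :: rest) = "#" :: tcol rest := by
  rw [tcol]; simp

theorem tcol_cons {t : String} (rest : List String) (ht : t ≠ "#") :
    tcol (t :: rest) = normSeg (t :: rest.takeWhile pvNH) ++ tcol (rest.dropWhile pvNH) := by
  rw [tcol, if_neg ht]

theorem length_normSeg (l : List String) : (normSeg l).length = l.length := by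
  have := l.countP_le_length (p := fun t => t == "O")
  simp [normSeg, countO]; omega

theorem length_tcol (l : List String) : (tcol l).length = l.length := by
  induction l using tcol.induct with
  | case1 => simp [tcol_nil]
  | case2 rest ih => simp [tcol_hash, ih]
  | case3 t rest ht ih =>
    rw [tcol_cons rest ht]
    have h2 := rest.takeWhile_append_dropWhile (p := pvNH)
    have := List.length_append (as := rest.takeWhile pvNH) (bs := rest.dropWhile pvNH)
    simp only [List.length_append, List.length_cons, length_normSeg, ih]
    rw [h2] at this
    omega

theorem takeWhile_append_false {p : α → Bool} {u : List α} (x : α) (z : List α)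
    (hu : ∀ a ∈ u, p a) (hx : p x = false) :
    (u ++ x :: z).takeWhile p = u ∧ (u ++ x :: z).dropWhile p = x :: z := by
  induction u with
  | nil => simp [List.takeWhile_cons, List.dropWhile_cons, hx]
  | cons a u ih =>
    have ha : p a := hu a (by simp)
    have := ih (fun b hb => hu b (by simp [hb]))
    simp [List.takeWhile_cons, List.dropWhile_cons, ha, this.1, this.2]

theorem tcol_nonhash (l : List String) (h : ∀ a ∈ l, pvNH a) : tcol l = normSeg l := by
  cases l with
  | nil => simp [tcol, normSeg, countO]
  | cons t rest =>
    have ht : t ≠ "#" := by have := h t (by simp); simpa [pvNH] using this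
    rw [tcol_cons rest ht]
    rw [List.takeWhile_eq_self_iff.mpr (fun a ha => h a (by simp [ha]))]
    rw [List.dropWhile_eq_nil_iff.mpr (fun a ha => h a (by simp [ha]))]
    simp [tcol_nil]

theorem tcol_append_hash (u : List String) : ∀ z : List String,
    tcol (u ++ "#" :: z) = tcol u ++ "#" :: tcol z := by
  induction u using tcol.induct with
  | case1 => intro z; simp [tcol]
  | case2 rest ih =>
    intro z
    simp only [List.cons_append]
    rw [tcol_hash, tcol_hash, ih]
    simp
  | case3 t rest ht ih =>
    intro z
    by_cases hd : rest.dropWhile pvNH = []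
    · -- rest is all non-hash
      have hall : ∀ a ∈ rest, pvNH a := by
        intro a ha
        have : rest.takeWhile pvNH = rest := by
          have := rest.takeWhile_append_dropWhile (p := pvNH); rw [hd] at this; simpa using this
        exact List.mem_takeWhile_imp (by rw [this]; exact ha)
      have hsp := takeWhile_append_false (p := pvNH) "#" z hall (by simp [pvNH])
      have htw : rest.takeWhile pvNH = rest := by
        have := rest.takeWhile_append_dropWhile (p := pvNH); rw [hd] at this; simpa using this
      simp only [List.cons_append]
      rw [tcol_cons _ ht, hsp.1, hsp.2, tcol_hash]
      rw [tcol_cons rest ht, hd, htw, tcol_nil]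
      simp
    · -- rest = v ++ "#" :: w
      obtain ⟨x, w, hxw⟩ : ∃ x w, rest.dropWhile pvNH = x :: w := by
        cases h : rest.dropWhile pvNH with
        | nil => exact absurd h hd
        | cons x w => exact ⟨x, w, rfl⟩
      have hx : pvNH x = false := by
        have := List.head_dropWhile_not pvNH (l := rest) (by rw [hxw]; simp)
        simpa [hxw] using this
      have hxhash : x = "#" := by simpa [pvNH] using hx
      subst hxhash
      set v := rest.takeWhile pvNH with hv
      have hrest : rest = v ++ "#" :: w := by
        rw [hv, ← hxw]; exact (rest.takeWhile_append_dropWhile).symm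
      have hvall : ∀ a ∈ v, pvNH a := fun a ha => List.mem_takeWhile_imp ha
      have hsp1 := takeWhile_append_false (p := pvNH) "#" (w ++ "#" :: z) hvall (by simp [pvNH])
      have hsp2 := takeWhile_append_false (p := pvNH) "#" w hvall (by simp [pvNH])
      have ihw : tcol (w ++ "#" :: z) = tcol w ++ "#" :: tcol z := by
        have := ih z
        rw [hxw] at this
        simp only [List.cons_append, tcol_hash] at this
        exact List.cons_injective.eq_iff.mp this
      simp only [List.cons_append]
      rw [tcol_cons _ ht]
      rw [show (rest ++ "#" :: z) = v ++ "#" :: (w ++ "#" :: z) by rw [hrest]; simp]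
      rw [hsp1.1, hsp1.2]
      rw [tcol_cons _ ht, hrest, hsp2.1, hsp2.2]
      rw [tcol_hash, tcol_hash, ihw]
      simp
-- derived segment lemmas
theorem countO_rep_dot (m : Nat) : countO (List.replicate m ".") = 0 := by
  simp [countO, List.countP_replicate]

theorem normSeg_rep_dot (m : Nat) : normSeg (List.replicate m ".") = List.replicate m "." := by
  simp [normSeg, countO_rep_dot]

theorem rep_dot_nonhash (m : Nat) : ∀ a ∈ List.replicate m ".", pvNH a := by
  intro a ha
  have := List.eq_of_mem_replicate ha
  simp [pvNH, this]

theorem tcol_rep_dot (m : Nat) : tcol (List.replicate m ".") = List.replicate m "." := by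
  rw [tcol_nonhash _ (rep_dot_nonhash m)]
  exact normSeg_rep_dot m

theorem normSeg_mid_O (u p : List String) :
    normSeg (u ++ "O" :: p) = "O" :: normSeg (u ++ p) := by
  have hc : countO (u ++ "O" :: p) = countO (u ++ p) + 1 := by
    simp [countO, List.countP_append, List.countP_cons]
    omega
  have hl : (u ++ "O" :: p).length = (u ++ p).length + 1 := by
    simp only [List.length_append, List.length_cons]; omega
  have hk : countO (u ++ p) ≤ (u ++ p).length := List.countP_le_length
  rw [normSeg, normSeg, hc, hl]
  rw [show (u ++ p).length + 1 - (countO (u ++ p) + 1) = (u ++ p).length - countO (u ++ p) by omega]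
  simp [List.replicate_succ]

theorem normSeg_mid_other (u p : List String) (t : String) (ht : t ≠ "O") :
    normSeg (u ++ t :: p) = normSeg (u ++ "." :: p) := by
  have hc : countO (u ++ t :: p) = countO (u ++ "." :: p) := by
    simp [countO, List.countP_append, List.countP_cons, ht]
  have hl : (u ++ t :: p).length = (u ++ "." :: p).length := by simp
  rw [normSeg, normSeg, hc, hl]

theorem seg_split (rest : List String) :
    (∀ a ∈ rest, pvNH a) ∨ ∃ v w, rest = v ++ "#" :: w ∧ ∀ a ∈ v, pvNH a := by
  by_cases hd : rest.dropWhile pvNH = []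
  · left
    intro a ha
    have htw : rest.takeWhile pvNH = rest := by
      have := rest.takeWhile_append_dropWhile (p := pvNH); rw [hd] at this; simpa using this
    exact List.mem_takeWhile_imp (by rw [htw]; exact ha)
  · right
    obtain ⟨x, w, hxw⟩ : ∃ x w, rest.dropWhile pvNH = x :: w := by
      cases h : rest.dropWhile pvNH with
      | nil => exact absurd h hd
      | cons x w => exact ⟨x, w, rfl⟩
    have hx : pvNH x = false := by
      have := List.head_dropWhile_not pvNH (l := rest) (by rw [hxw]; simp)
      simpa [hxw] using this
    have hxh : x = "#" := by simpa [pvNH] using hx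
    refine ⟨rest.takeWhile pvNH, w, ?_, fun a ha => List.mem_takeWhile_imp ha⟩
    rw [← hxh, ← hxw]
    exact (rest.takeWhile_append_dropWhile).symm

theorem nonhash_append (u v : List String) (t : String) (htH : t ≠ "#")
    (hu : ∀ a ∈ u, pvNH a) (hv : ∀ a ∈ v, pvNH a) : ∀ a ∈ u ++ t :: v, pvNH a := by
  intro a ha
  simp at ha
  rcases ha with h | h | h
  · exact hu a h
  · simp [h, pvNH, htH]
  · exact hv a h

theorem nonhash_append2 (u v : List String)
    (hu : ∀ a ∈ u, pvNH a) (hv : ∀ a ∈ v, pvNH a) : ∀ a ∈ u ++ v, pvNH a := by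
  intro a ha
  simp at ha
  rcases ha with h | h
  · exact hu a h
  · exact hv a h

theorem tcol_mid_O (u rest : List String) (hu : ∀ a ∈ u, pvNH a) :
    tcol (u ++ "O" :: rest) = "O" :: tcol (u ++ rest) := by
  rcases seg_split rest with hall | ⟨v, w, hvw, hv⟩
  · rw [tcol_nonhash _ (nonhash_append u rest "O" (by decide) hu hall)]
    rw [tcol_nonhash _ (nonhash_append2 u rest hu hall)]
    exact normSeg_mid_O u rest
  · subst hvw
    rw [show u ++ "O" :: (v ++ "#" :: w) = (u ++ "O" :: v) ++ "#" :: w by simp]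
    rw [show u ++ (v ++ "#" :: w) = (u ++ v) ++ "#" :: w by simp]
    rw [tcol_append_hash, tcol_append_hash]
    rw [tcol_nonhash (u ++ "O" :: v) (nonhash_append u v "O" (by decide) hu hv)]
    rw [tcol_nonhash (u ++ v) (nonhash_append2 u v hu hv)]
    rw [normSeg_mid_O u v]
    simp

theorem tcol_mid_other (u rest : List String) (hu : ∀ a ∈ u, pvNH a)
    (t : String) (htH : t ≠ "#") (htO : t ≠ "O") :
    tcol (u ++ t :: rest) = tcol (u ++ "." :: rest) := by
  rcases seg_split rest with hall | ⟨v, w, hvw, hv⟩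
  · rw [tcol_nonhash _ (nonhash_append u rest t htH hu hall)]
    rw [tcol_nonhash _ (nonhash_append u rest "." (by decide) hu hall)]
    exact normSeg_mid_other u rest t htO
  · subst hvw
    rw [show u ++ t :: (v ++ "#" :: w) = (u ++ t :: v) ++ "#" :: w by simp]
    rw [show u ++ "." :: (v ++ "#" :: w) = (u ++ "." :: v) ++ "#" :: w by simp]
    rw [tcol_append_hash, tcol_append_hash]
    rw [tcol_nonhash (u ++ t :: v) (nonhash_append u v t htH hu hv)]
    rw [tcol_nonhash (u ++ "." :: v) (nonhash_append u v "." (by decide) hu hv)]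
    rw [normSeg_mid_other u v t htO]

-- positional lemmas
theorem getD_normSeg (l : List String) (r : Nat) (hr : r < l.length) :
    (normSeg l).getD r "" = if r < countO l then "O" else "." := by
  have hk : countO l ≤ l.length := List.countP_le_length
  rw [normSeg]
  by_cases h : r < countO l
  · rw [if_pos h, List.getD_append _ _ _ _ (by simpa using h)]
    simp [List.getD_replicate, h]
  · rw [if_neg h]
    rw [List.getD_append_right _ _ _ _ (by simpa using h)]
    have : r - (List.replicate (countO l) "O").length < (List.replicate (l.length - countO l) ".").length := by
      simp; omega
    simp only [List.length_replicate] at this ⊢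
    rw [List.getD_eq_getElem _ _ (by simpa using this)]
    simp [List.getElem_replicate]

theorem tcol_getD_hash (col : List String) (r : Nat) (hr : r < col.length)
    (h : col.getD r "" = "#") : (tcol col).getD r "" = "#" := by
  have hcr : col[r] = "#" := by rw [List.getD_eq_getElem _ _ hr] at h; exact h
  have hdec : col = col.take r ++ "#" :: col.drop (r + 1) := by
    conv_lhs => rw [← List.take_append_drop r col]
    rw [← List.getElem_cons_drop hr, hcr]
  calc (tcol col).getD r "" = (tcol (col.take r ++ "#" :: col.drop (r+1))).getD r "" := by rw [← hdec]
    _ = "#" := by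
        rw [tcol_append_hash]
        rw [List.getD_append_right _ _ _ _ (by simp [length_tcol])]
        have : r - (tcol (col.take r)).length = 0 := by simp [length_tcol]; omega
        rw [this]
        simp

theorem tcol_getD_seg0 (col : List String) (r : Nat) (hr : r < col.length)
    (h : ∀ j, j ≤ r → col.getD j "" ≠ "#") :
    (tcol col).getD r "" = if r < countO (col.takeWhile pvNH) then "O" else "." := by
  rcases seg_split col with hall | ⟨v, w, hvw, hv⟩
  · rw [tcol_nonhash _ hall, List.takeWhile_eq_self_iff.mpr hall]
    exact getD_normSeg col r hr
  · have hrv : r < v.length := by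
      by_contra hge
      push_neg at hge
      have : col.getD v.length "" = "#" := by
        rw [hvw]
        rw [List.getD_eq_getElem _ _ (by simp)]
        simp
      exact h v.length hge this
    have htw : col.takeWhile pvNH = v := by
      rw [hvw]
      exact (takeWhile_append_false (p := pvNH) "#" w hv (by simp [pvNH])).1
    rw [htw]
    conv_lhs => rw [hvw]
    rw [tcol_append_hash, tcol_nonhash v hv]
    rw [List.getD_append _ _ _ _ (by rw [length_normSeg]; exact hrv)]
    exact getD_normSeg v r hrv

theorem tcol_getD_seg (col : List String) (r s : Nat) (hsr : s ≤ r) (hr : r < col.length)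
    (hs : s = 0 ∨ col.getD (s-1) "" = "#")
    (h : ∀ j, s ≤ j → j ≤ r → col.getD j "" ≠ "#") :
    (tcol col).getD r "" =
      (if r - s < countO ((col.drop s).takeWhile pvNH) then "O" else ".") := by
  rcases hs with hs0 | hsH
  · subst hs0
    simpa using tcol_getD_seg0 col r hr (fun j hj => h j (Nat.zero_le j) hj)
  · have hs1 : s - 1 < col.length := by omega
    have hspos : 0 < s := by
      rcases Nat.eq_zero_or_pos s with h0 | h0
      · exfalso; exact h 0 (by omega) (by omega) (by rw [h0] at hsH; simpa using hsH)
      · exact h0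
    have hdec : col = col.take (s-1) ++ "#" :: col.drop s := by
      have h1 : col = col.take (s-1) ++ col.drop (s-1) := (List.take_append_drop (s-1) col).symm
      have h2 : col.drop (s-1) = "#" :: col.drop s := by
        have hcr : col[s-1] = "#" := by rw [List.getD_eq_getElem _ _ hs1] at hsH; exact hsH
        have h3 : s - 1 + 1 = s := by omega
        rw [← List.getElem_cons_drop hs1, hcr, h3]
      rw [← h2]; exact h1
    conv_lhs => rw [hdec]
    rw [tcol_append_hash]
    rw [List.getD_append_right _ _ _ _
      (by simp [length_tcol]; exact Or.inl (by omega))]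
    have hlen : (tcol (col.take (s-1))).length = s - 1 := by simp [length_tcol]; omega
    rw [hlen]
    have hidx : r - (s-1) = (r - s) + 1 := by omega
    rw [hidx]
    simp only [List.getD_cons_succ]
    have := tcol_getD_seg0 (col.drop s) (r - s) (by simp; omega) (fun j hj => by
      rw [List.getD_eq_getElem _ _ (by simp; omega)]
      have : (col.drop s)[j]'(by simp; omega) = col[s + j]'(by omega) := by
        rw [List.getElem_drop]
      rw [this, ← List.getD_eq_getElem _ _ (by omega)]
      exact h (s + j) (by omega) (by omega))
    rw [this]

-- ---------- Part II : grid toolkit ----------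

def cget (F : List (List String)) (r c : Nat) : String := (F.getD r []).getD c ""

def colN (F : List (List String)) (c : Nat) : List String := F.map (fun row => row.getD c "")

def sset (F : List (List String)) (r c : Nat) (v : String) : List (List String) :=
  F.set r ((F.getD r []).set c v)

def SqN (F : List (List String)) (n : Nat) : Prop :=
  F.length = n ∧ ∀ (i : Nat) (h : i < F.length), F[i].length = n

theorem pvCell_nonneg (F : List (List String)) (r c : Int) (hr : 0 ≤ r) (hc : 0 ≤ c) :
    pvCell F r c = cget F r.toNat c.toNat := by
  rw [pvCell, cget, PySem.List.pyGet?_of_nonneg _ hr]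
  rcases h : F[r.toNat]? with _ | row
  · simp [List.getD_eq_getElem?_getD, h, PySem.List.pyGet?_of_nonneg _ hc]
  · simp [List.getD_eq_getElem?_getD, h, PySem.List.pyGet?_of_nonneg _ hc]

theorem pvSetCell_nonneg (F : List (List String)) (r c : Int) (v : String) (hr : 0 ≤ r) :
    pvSetCell F r c v = sset F r.toNat c.toNat v := by
  rw [pvSetCell, sset, PySem.List.pyGet?_of_nonneg _ hr]
  rcases h : F[r.toNat]? with _ | row
  · simp [List.getD_eq_getElem?_getD, h]
  · simp [List.getD_eq_getElem?_getD, h]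

theorem length_colN (F : List (List String)) (c : Nat) : (colN F c).length = F.length := by
  simp [colN]

theorem cget_eq_colN (F : List (List String)) (r c : Nat) :
    cget F r c = (colN F c).getD r "" := by
  rw [cget, colN]
  have := List.getD_map (n := r) F [] (fun row => row.getD c "")
  simp only [List.getD_eq_getElem?_getD, List.getElem?_nil, Option.getD_none] at this
  simp only [List.getD_eq_getElem?_getD]
  exact this.symm

theorem length_sset (F : List (List String)) (r c : Nat) (v : String) :
    (sset F r c v).length = F.length := by simp [sset]

theorem SqN_sset {F : List (List String)} {n : Nat} (hF : SqN F n) (r c : Nat) (v : String) :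
    SqN (sset F r c v) n := by
  obtain ⟨hlen, hrow⟩ := hF
  refine ⟨by simp [sset, hlen], ?_⟩
  intro i hi0
  have hi : i < F.length := by simpa [sset] using hi0
  simp only [sset]
  by_cases hir : i = r
  · subst hir
    rw [List.getElem_set_self (by simpa using hi)]
    simp only [List.length_set]
    rw [List.getD_eq_getElem F [] hi]
    exact hrow i hi
  · rw [List.getElem_set_ne (by omega)]
    exact hrow i hi

theorem colN_sset_other (F : List (List String)) (r c c' : Nat) (v : String) (h : c' ≠ c) :
    colN (sset F r c v) c' = colN F c' := by
  apply List.ext_getElem (by simp [colN, sset])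
  intro i h1 h2
  have hi : i < F.length := by simpa [colN] using h2
  simp only [colN, sset, List.getElem_map]
  by_cases hir : i = r
  · subst hir
    rw [List.getElem_set_self (by simpa using hi)]
    rw [List.getD_eq_getElem?_getD (l := (F.getD i []).set c v), List.getElem?_set_ne (by omega)]
    rw [List.getD_eq_getElem _ _ hi, List.getD_eq_getElem?_getD]
  · rw [List.getElem_set_ne (by omega)]

theorem colN_sset_same (F : List (List String)) (r c : Nat) (v : String)
    (hr : r < F.length) (hc : c < (F.getD r []).length) :
    colN (sset F r c v) c = (colN F c).set r v := by
  apply List.ext_getElem (by simp [colN, sset])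
  intro i h1 h2
  simp only [colN, sset, List.getElem_map]
  by_cases hir : i = r
  · subst hir
    rw [List.getElem_set_self (by simpa using hr)]
    rw [List.getElem_set_self (by simpa [colN] using hr)]
    rw [List.getD_eq_getElem?_getD, List.getElem?_set_self' ]
    rw [List.getElem?_eq_getElem (by simpa using hc)]
    simp
  · rw [List.getElem_set_ne (by omega), List.getElem_set_ne (by omega)]
    simp [colN]

theorem cget_colN_ext {F G : List (List String)} {n : Nat} (hF : SqN F n) (hG : SqN G n)
    (h : ∀ c : Nat, c < n → colN F c = colN G c) : F = G := by
  obtain ⟨hFl, hFr⟩ := hF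
  obtain ⟨hGl, hGr⟩ := hG
  apply List.ext_getElem (by omega)
  intro i h1 h2
  apply List.ext_getElem (by rw [hFr i h1, hGr i h2])
  intro j hj1 hj2
  have hjn : j < n := by rw [hFr i h1] at hj1; exact hj1
  have hcol := h j hjn
  have h1' : i < (colN F j).length := by simpa [length_colN] using h1
  have key : F[i].getD j "" = G[i].getD j "" := by
    calc F[i].getD j "" = (colN F j)[i]'h1' := by simp [colN]
      _ = (colN G j)[i]'(hcol ▸ h1') := List.getElem_of_eq hcol h1'
      _ = G[i].getD j "" := by simp [colN]
  rw [List.getD_eq_getElem _ _ hj1, List.getD_eq_getElem _ _ hj2] at key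
  exact key

-- ---------- Part III : B's sweep computes tcol on every column ----------

theorem getD_set_ne (l : List String) (i j : Nat) (v d : String) (h : i ≠ j) :
    (l.set i v).getD j d = l.getD j d := by
  simp [List.getD_eq_getElem?_getD, List.getElem?_set_ne h]

theorem getD_set_self (l : List String) (i : Nat) (v d : String) (h : i < l.length) :
    (l.set i v).getD i d = v := by
  simp [List.getD_eq_getElem?_getD, List.getElem?_set_self, h]

theorem take_set_ge (l : List String) (i : Nat) (v : String) (m : Nat) (h : m ≤ i) :
    (l.set i v).take m = l.take m := by
  apply List.ext_getElem (by simp)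
  intro j h1 h2
  simp only [List.length_take, List.length_set] at h1 h2
  rw [List.getElem_take, List.getElem_take, List.getElem_set_ne (by omega)]

theorem drop_set_lt (l : List String) (i : Nat) (v : String) (m : Nat) (h : i < m) :
    (l.set i v).drop m = l.drop m := by
  apply List.ext_getElem (by simp)
  intro j h1 h2
  simp only [List.length_drop, List.length_set] at h1 h2
  rw [List.getElem_drop, List.getElem_drop, List.getElem_set_ne (by omega)]

theorem drop_rep (l : List String) (a b : Nat) (v : String) (hab : a ≤ b) (hb : b ≤ l.length)
    (h : ∀ j, a ≤ j → j < b → l.getD j "" = v) :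
    l.drop a = List.replicate (b - a) v ++ l.drop b := by
  obtain ⟨d, rfl⟩ : ∃ d, b = a + d := ⟨b - a, by omega⟩
  clear hab
  induction d generalizing a with
  | zero => simp
  | succ d ih =>
    have hstep : l.drop a = v :: l.drop (a+1) := by
      have hd : l.drop a = l.getD a "" :: l.drop (a+1) := by
        rw [List.getD_eq_getElem _ _ (by omega)]
        exact (List.getElem_cons_drop (by omega)).symm
      rw [hd, h a (by omega) (by omega)]
    have ih' := ih (a+1) (by omega) (fun j hj1 hj2 => h j (by omega) (by omega))
    rw [hstep, ih']
    rw [show a + (d + 1) - a = d + 1 by omega, show a + 1 + d - (a + 1) = d by omega,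
        show a + (d + 1) = a + 1 + d by omega]
    simp [List.replicate_succ]

theorem drop_decomp (l : List String) (a b : Nat) (v : String) (hab : a ≤ b) (hb : b < l.length)
    (h : ∀ j, a ≤ j → j < b → l.getD j "" = v) :
    l.drop a = List.replicate (b - a) v ++ l.getD b "" :: l.drop (b+1) := by
  rw [drop_rep l a b v hab (by omega) h]
  congr 1
  rw [List.getD_eq_getElem _ _ hb]
  exact (List.getElem_cons_drop (by omega)).symm

theorem take_rep (l : List String) (a b : Nat) (v : String) (hab : a ≤ b) (hb : b ≤ l.length)
    (h : ∀ j, a ≤ j → j < b → l.getD j "" = v) :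
    l.take b = l.take a ++ List.replicate (b - a) v := by
  have h1 : l.take b = l.take (a + (b - a)) := by congr 1; omega
  rw [h1, List.take_add]
  congr 1
  rw [drop_rep l a b v hab hb h]
  rw [List.take_append]
  simp

theorem set_take_succ (l : List String) (i : Nat) (v : String) (h : i < l.length) :
    (l.set i v).take (i+1) = l.take i ++ [v] := by
  rw [List.take_succ]
  rw [List.getElem?_eq_getElem (by simpa using h), List.getElem_set_self (by simpa using h)]
  rw [take_set_ge _ _ _ _ (le_refl i)]
  simp

-- the loop body of B's inner sweep, named for the proofs (defeq to the lambda in the port)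
def bbody (x : Int) (s : List (List String) × Int) (y : Int) : List (List String) × Int :=
  if pvCell s.1 y x = "#" then (s.1, y + 1)
  else
    if pvCell s.1 y x = "O" then (pvSetCell (pvSetCell s.1 y x ".") s.2 x "O", s.2 + 1)
    else (pvSetCell s.1 y x ".", s.2)

theorem binnerB (n : Nat) (x : Int) (hx0 : 0 ≤ x) (hxn : x.toNat < n) :
    ∀ (k : Nat) (H : List (List String)) (free y : Int),
      SqN H n → 0 ≤ free → free ≤ y → y = (n : Int) - (k : Int) →
      (∀ j : Nat, free.toNat ≤ j → j < y.toNat → (colN H x.toNat).getD j "" = ".") →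
      (SqN ((PySem.List.pyRange y (n : Int) 1).foldl (bbody x) (H, free)).1 n ∧
       colN ((PySem.List.pyRange y (n : Int) 1).foldl (bbody x) (H, free)).1 x.toNat =
         (colN H x.toNat).take free.toNat ++ tcol ((colN H x.toNat).drop free.toNat) ∧
       ∀ c' : Nat, c' ≠ x.toNat →
         colN ((PySem.List.pyRange y (n : Int) 1).foldl (bbody x) (H, free)).1 c' = colN H c') := by
  intro k
  induction k with
  | zero =>
    intro H free y hH hf0 hfy hy hdots
    have hyn : y = (n : Int) := by omega
    subst hyn
    rw [PySem.List.pyRange_one_eq_nil (by omega)]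
    simp only [List.foldl_nil]
    refine ⟨hH, ?_, by intro c' _; simp⟩
    have hcl : (colN H x.toNat).length = n := by rw [length_colN, hH.1]
    have hdn : (colN H x.toNat).drop n = [] := List.drop_eq_nil_of_le (by omega)
    have hd := drop_rep (colN H x.toNat) free.toNat n "." (by omega) (by omega)
      (fun j hj1 hj2 => hdots j hj1 (by omega))
    rw [hdn, List.append_nil] at hd
    rw [hd, tcol_rep_dot, ← hd, List.take_append_drop]
  | succ k IH =>
    intro H free y hH hf0 hfy hy hdots
    have hHlen : H.length = n := hH.1
    have hyn : y < (n : Int) := by omega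
    have hy0 : 0 ≤ y := by omega
    rw [PySem.List.pyRange_one_cons (by omega)]
    simp only [List.foldl_cons]
    have hxrow : x.toNat < (H.getD y.toNat []).length := by
      rw [List.getD_eq_getElem _ _ (by omega : y.toNat < H.length)]
      rw [hH.2 y.toNat (by omega)]
      exact hxn
    set col := colN H x.toNat with hcol
    have hcl : col.length = n := by rw [hcol, length_colN, hH.1]
    have htile : pvCell H y x = col.getD y.toNat "" := by
      rw [pvCell_nonneg H y x hy0 hx0, cget_eq_colN]
    set a := free.toNat with ha
    set b := y.toNat with hb
    have hab : a ≤ b := by omega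
    have hbn : b < n := by omega
    by_cases hHash : col.getD b "" = "#"
    · -- tile = '#'
      have hbody : bbody x (H, free) y = (H, y + 1) := by
        unfold bbody
        rw [htile, if_pos hHash]
      rw [hbody]
      obtain ⟨ih1, ih2, ih3⟩ := IH H (y+1) (y+1) hH (by omega) (by omega) (by omega)
        (fun j hj1 hj2 => absurd (by omega : j < j) (by omega))
      refine ⟨ih1, ?_, ih3⟩
      rw [ih2, ← hcol]
      have e3 := drop_decomp col a b "." hab (by omega)
        (fun j h1 h2 => hdots j h1 (by omega))
      rw [hHash] at e3
      have etake : col.take ((y+1).toNat) = (col.take a ++ List.replicate (b - a) ".") ++ ["#"] := by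
        rw [show (y+1).toNat = b + 1 by omega]
        rw [← take_rep col a b "." hab (by omega) (fun j h1 h2 => hdots j h1 (by omega))]
        rw [List.take_succ, List.getElem?_eq_getElem (by omega)]
        rw [show col[b] = col.getD b "" from (List.getD_eq_getElem _ _ (by omega)).symm, hHash]
        simp
      rw [show ((y+1).toNat) = b + 1 by omega] at etake ⊢
      rw [e3, tcol_append_hash, tcol_rep_dot, etake]
      simp
    · by_cases hO : col.getD b "" = "O"
      · -- tile = 'O'
        have hbody : bbody x (H, free) y =
            (pvSetCell (pvSetCell H y x ".") free x "O", free + 1) := by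
          unfold bbody
          rw [htile, if_neg hHash, if_pos hO]
        rw [hbody]
        rw [pvSetCell_nonneg H y x "." hy0]
        rw [pvSetCell_nonneg _ free x "O" hf0]
        have hH1sq : SqN (sset H b x.toNat ".") n := SqN_sset hH b x.toNat "."
        have hH2sq : SqN (sset (sset H b x.toNat ".") a x.toNat "O") n := SqN_sset hH1sq a x.toNat "O"
        set H2 := sset (sset H b x.toNat ".") a x.toNat "O" with hH2
        have hxrow2 : x.toNat < ((sset H b x.toNat ".").getD a []).length := by
          rw [List.getD_eq_getElem _ _ (by rw [length_sset]; omega)]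
          rw [hH1sq.2 a (by rw [length_sset]; omega)]
          exact hxn
        have hcol2 : colN H2 x.toNat = (col.set b ".").set a "O" := by
          rw [hH2, colN_sset_same _ _ _ _ (by rw [length_sset]; omega) hxrow2,
              colN_sset_same _ _ _ _ (by omega) hxrow]
        set col' := (col.set b ".").set a "O" with hcol'
        have hcl' : col'.length = n := by simp [hcol', hcl]
        obtain ⟨ih1, ih2, ih3⟩ := IH H2 (free+1) (y+1) hH2sq (by omega) (by omega) (by omega)
          (fun j hj1 hj2 => by
            rw [hcol2, hcol']
            by_cases hjb : j = b
            · subst hjb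
              rw [getD_set_ne _ _ _ _ _ (by omega)]
              exact getD_set_self _ _ _ _ (by omega)
            · rw [getD_set_ne _ _ _ _ _ (by omega), getD_set_ne _ _ _ _ _ (by omega)]
              exact hdots j (by omega) (by omega))
        refine ⟨ih1, ?_, ?_⟩
        · rw [ih2, hcol2]
          have e1 : col'.take ((free+1).toNat) = col.take a ++ ["O"] := by
            rw [show ((free+1).toNat) = a + 1 by omega]
            rw [hcol', set_take_succ _ _ _ (by simp [hcl]; omega)]
            rw [take_set_ge _ _ _ _ hab]
          have e2 : col'.drop ((free+1).toNat) = List.replicate (b - a) "." ++ col.drop (b+1) := by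
            have hstep := drop_rep col' (a+1) (b+1) "." (by omega) (by omega)
              (fun j hj1 hj2 => by
                rw [hcol']
                by_cases hjb : j = b
                · subst hjb
                  rw [getD_set_ne _ _ _ _ _ (by omega)]
                  exact getD_set_self _ _ _ _ (by omega)
                · rw [getD_set_ne _ _ _ _ _ (by omega), getD_set_ne _ _ _ _ _ (by omega)]
                  exact hdots j (by omega) (by omega))
            have hdsame : col'.drop (b+1) = col.drop (b+1) := by
              rw [hcol', drop_set_lt _ _ _ _ (by omega), drop_set_lt _ _ _ _ (by omega)]
            rw [show ((free+1).toNat) = a + 1 by omega, hstep, hdsame]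
            congr 2
            omega
          have e3 := drop_decomp col a b "." hab (by omega)
            (fun j h1 h2 => hdots j h1 (by omega))
          rw [hO] at e3
          rw [e1, e2, e3]
          rw [tcol_mid_O _ _ (rep_dot_nonhash (b - a))]
          simp
        · intro c' hc'
          rw [ih3 c' hc', hH2, colN_sset_other _ _ _ _ _ hc', colN_sset_other _ _ _ _ _ hc']
      · -- tile is neither '#' nor 'O'
        have hbody : bbody x (H, free) y = (pvSetCell H y x ".", free) := by
          unfold bbody
          rw [htile, if_neg hHash, if_neg hO]
        rw [hbody]
        rw [pvSetCell_nonneg H y x "." hy0]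
        have hH1sq : SqN (sset H b x.toNat ".") n := SqN_sset hH b x.toNat "."
        have hcol1 : colN (sset H b x.toNat ".") x.toNat = col.set b "." := by
          rw [colN_sset_same _ _ _ _ (by omega) hxrow]
        set col1 := col.set b "." with hcol1d
        obtain ⟨ih1, ih2, ih3⟩ := IH (sset H b x.toNat ".") free (y+1) hH1sq (by omega) (by omega)
          (by omega)
          (fun j hj1 hj2 => by
            rw [hcol1, hcol1d]
            by_cases hjb : j = b
            · subst hjb
              exact getD_set_self _ _ _ _ (by omega)
            · rw [getD_set_ne _ _ _ _ _ (by omega)]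
              exact hdots j (by omega) (by omega))
        refine ⟨ih1, ?_, ?_⟩
        · rw [ih2, hcol1]
          have f1 : col1.take a = col.take a := by
            rw [hcol1d, take_set_ge _ _ _ _ (by omega)]
          have f2 : col1.drop a = List.replicate (b - a) "." ++ "." :: col.drop (b+1) := by
            have := drop_decomp col1 a b "." hab (by simp [hcol1d, hcl]; omega)
              (fun j hj1 hj2 => by
                rw [hcol1d, getD_set_ne _ _ _ _ _ (by omega)]
                exact hdots j (by omega) (by omega))
            rw [this, hcol1d, getD_set_self _ _ _ _ (by omega), drop_set_lt _ _ _ _ (by omega)]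
          have f3 : col.drop a =
              List.replicate (b - a) "." ++ (col.getD b "") :: col.drop (b+1) :=
            drop_decomp col a b "." hab (by omega) (fun j h1 h2 => hdots j h1 (by omega))
          rw [f1, f2, f3]
          rw [tcol_mid_other _ _ (rep_dot_nonhash (b - a)) _ hHash hO]
        · intro c' hc'
          rw [ih3 c' hc', colN_sset_other _ _ _ _ _ hc']

-- ---------- Part IV : A's anchor passes compute tcol on every column ----------

theorem acount (n : Nat) (F : List (List String)) (hF : SqN F n) (c a : Int)
    (hc0 : 0 ≤ c) (hcn : c.toNat < n) (ha : -1 ≤ a) :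
    ∀ (k : Nat) (y0 : Int) (acc : Int), 1 ≤ y0 → y0 = (n : Int) + 1 - (k : Int) →
      pvCountLoop F (n : Int) (c, a) (PySem.List.pyRange y0 ((n : Int) + 1) 1) acc =
        acc + (countO (((colN F c.toNat).drop (a + y0).toNat).takeWhile pvNH) : Int) := by
  have hcl : (colN F c.toNat).length = n := by rw [length_colN, hF.1]
  intro k
  induction k with
  | zero =>
    intro y0 acc hy1 hyk
    rw [PySem.List.pyRange_one_eq_nil (by omega)]
    rw [List.drop_eq_nil_of_le (by omega)]
    simp [pvCountLoop, countO]
  | succ k IH =>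
    intro y0 acc hy1 hyk
    rw [PySem.List.pyRange_one_cons (by omega)]
    simp only [pvCountLoop]
    by_cases hbr : (n : Int) ≤ a + y0
    · rw [if_pos hbr]
      rw [List.drop_eq_nil_of_le (by omega)]
      simp [countO]
    · rw [if_neg hbr]
      have hr0 : (a + y0).toNat < n := by omega
      have hcell : pvCell F (a + y0) c = (colN F c.toNat).getD (a + y0).toNat "" := by
        rw [pvCell_nonneg F _ c (by omega) hc0, cget_eq_colN]
      have hdec : (colN F c.toNat).drop (a + y0).toNat =
          (colN F c.toNat).getD (a + y0).toNat "" :: (colN F c.toNat).drop ((a + y0).toNat + 1) := by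
        rw [List.getD_eq_getElem _ _ (by omega)]
        exact (List.getElem_cons_drop (by omega)).symm
      by_cases hH : (colN F c.toNat).getD (a + y0).toNat "" = "#"
      · rw [if_pos (by rw [hcell]; exact hH)]
        have htkw : ((colN F c.toNat).drop (a + y0).toNat).takeWhile pvNH = [] := by
          rw [hdec, hH, List.takeWhile_cons, if_neg (by simp [pvNH])]
        rw [htkw]
        simp [countO]
      · rw [if_neg (by rw [hcell]; exact hH)]
        have htkw : ((colN F c.toNat).drop (a + y0).toNat).takeWhile pvNH =
            (colN F c.toNat).getD (a + y0).toNat "" ::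
              ((colN F c.toNat).drop ((a + y0).toNat + 1)).takeWhile pvNH := by
          rw [hdec, List.takeWhile_cons,
              if_pos (by simp only [pvNH, ne_eq, decide_eq_true_eq]; exact hH)]
        have hccount : (countO (((colN F c.toNat).drop (a + y0).toNat).takeWhile pvNH) : Int) =
            (countO (((colN F c.toNat).drop ((a + y0).toNat + 1)).takeWhile pvNH) : Int) +
              (if (colN F c.toNat).getD (a + y0).toNat "" = "O" then 1 else 0) := by
          rw [htkw]
          simp only [countO, List.countP_cons]
          by_cases hOv : (colN F c.toNat).getD (a + y0).toNat "" = "O"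
          · rw [if_pos hOv, show ((colN F c.toNat).getD (a + y0).toNat "" == "O") = true by
              simp only [beq_iff_eq]; exact hOv]
            norm_num
          · rw [if_neg hOv, show ((colN F c.toNat).getD (a + y0).toNat "" == "O") = false by
              simp only [beq_eq_false_iff_ne, ne_eq]; exact hOv]
            norm_num
        have := IH (y0 + 1) (if pvCell F (a + y0) c = "O" then acc + 1 else acc) (by omega) (by omega)
        rw [show a + (y0 + 1) = (a + y0) + 1 by ring] at this
        rw [show ((a + y0) + 1).toNat = (a + y0).toNat + 1 by omega] at this
        rw [this, hccount, hcell]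
        split_ifs with hOv
        · omega
        · omega

theorem awrite (n : Nat) (c a cnt : Int) (hc0 : 0 ≤ c) (hcn : c.toNat < n) (ha : -1 ≤ a) :
    ∀ (k : Nat) (y0 : Int) (H : List (List String)), SqN H n → 1 ≤ y0 → 0 ≤ a + y0 →
      y0 = (n : Int) + 1 - (k : Int) →
      (SqN (pvWriteLoop (n : Int) (c, a) cnt (PySem.List.pyRange y0 ((n : Int) + 1) 1) H) n ∧
       (∀ c' : Nat, c' ≠ c.toNat →
          colN (pvWriteLoop (n : Int) (c, a) cnt (PySem.List.pyRange y0 ((n : Int) + 1) 1) H) c' =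
            colN H c') ∧
       (∀ r : Nat, (r < (a + y0).toNat ∨
            (a + y0).toNat + (((colN H c.toNat).drop (a + y0).toNat).takeWhile pvNH).length ≤ r) →
          (colN (pvWriteLoop (n : Int) (c, a) cnt (PySem.List.pyRange y0 ((n : Int) + 1) 1) H) c.toNat).getD r "" =
            (colN H c.toNat).getD r "") ∧
       (∀ r : Nat, (a + y0).toNat ≤ r →
          r < (a + y0).toNat + (((colN H c.toNat).drop (a + y0).toNat).takeWhile pvNH).length →
          (colN (pvWriteLoop (n : Int) (c, a) cnt (PySem.List.pyRange y0 ((n : Int) + 1) 1) H) c.toNat).getD r "" =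
            (if (r : Int) - a ≤ cnt then "O" else "."))) := by
  intro k
  induction k with
  | zero =>
    intro y0 H hH hy1 hay hyk
    rw [PySem.List.pyRange_one_eq_nil (by omega)]
    have hcl : (colN H c.toNat).length = n := by rw [length_colN, hH.1]
    rw [List.drop_eq_nil_of_le (by omega)]
    simp only [pvWriteLoop, List.takeWhile_nil, List.length_nil, Nat.add_zero]
    exact ⟨hH, by simp, by simp, fun r h1 h2 => absurd (Nat.lt_of_le_of_lt h1 h2) (by omega)⟩
  | succ k IH =>
    intro y0 H hH hy1 hay hyk
    have hcl : (colN H c.toNat).length = n := by rw [length_colN, hH.1]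
    rw [PySem.List.pyRange_one_cons (by omega)]
    simp only [pvWriteLoop]
    by_cases hbr : (n : Int) ≤ a + y0
    · rw [if_pos hbr]
      rw [List.drop_eq_nil_of_le (by omega)]
      simp only [List.takeWhile_nil, List.length_nil, Nat.add_zero]
      exact ⟨hH, by simp, by simp, fun r h1 h2 => absurd (Nat.lt_of_le_of_lt h1 h2) (by omega)⟩
    · rw [if_neg hbr]
      have hr0 : (a + y0).toNat < n := by omega
      set r0 := (a + y0).toNat with hr0d
      have hcell : pvCell H (a + y0) c = (colN H c.toNat).getD r0 "" := by
        rw [pvCell_nonneg H _ c (by omega) hc0, cget_eq_colN]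
      have hdec : (colN H c.toNat).drop r0 =
          (colN H c.toNat).getD r0 "" :: (colN H c.toNat).drop (r0 + 1) := by
        rw [List.getD_eq_getElem _ _ (by omega)]
        exact (List.getElem_cons_drop (by omega)).symm
      by_cases hH1 : (colN H c.toNat).getD r0 "" = "#"
      · rw [if_pos (by rw [hcell]; exact hH1)]
        rw [hdec, hH1]
        simp only [List.takeWhile_cons]
        rw [if_neg (by simp [pvNH])]
        simp only [List.length_nil, Nat.add_zero]
        exact ⟨hH, by simp, by simp, fun r h1 h2 => absurd (Nat.lt_of_le_of_lt h1 h2) (by omega)⟩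
      · rw [if_neg (by rw [hcell]; exact hH1)]
        -- the written value
        set v := if y0 ≤ cnt then "O" else "." with hv
        have hset : pvSetCell H (a + y0) c (if y0 ≤ cnt then "O" else ".") = sset H r0 c.toNat v := by
          rw [pvSetCell_nonneg H _ c _ (by omega)]
        have hxrow : c.toNat < (H.getD r0 []).length := by
          rw [List.getD_eq_getElem _ _ (by rw [hH.1]; omega)]
          rw [hH.2 r0 (by rw [hH.1]; omega)]
          exact hcn
        have hH'sq : SqN (sset H r0 c.toNat v) n := SqN_sset hH r0 c.toNat v
        have hcol' : colN (sset H r0 c.toNat v) c.toNat = (colN H c.toNat).set r0 v := by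
          rw [colN_sset_same _ _ _ _ (by rw [hH.1]; omega) hxrow]
        have hdropsame : ((colN H c.toNat).set r0 v).drop (r0 + 1) = (colN H c.toNat).drop (r0 + 1) :=
          drop_set_lt _ _ _ _ (by omega)
        have htkw : ((colN H c.toNat).drop r0).takeWhile pvNH =
            (colN H c.toNat).getD r0 "" :: ((colN H c.toNat).drop (r0+1)).takeWhile pvNH := by
          rw [hdec, List.takeWhile_cons,
              if_pos (by simp only [pvNH, ne_eq, decide_eq_true_eq]; exact hH1)]
        obtain ⟨ih1, ih2, ih3, ih4⟩ := IH (y0 + 1) (sset H r0 c.toNat v) hH'sq (by omega) (by omega) (by omega)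
        have hnext : (a + (y0 + 1)).toNat = r0 + 1 := by omega
        rw [hnext] at ih3 ih4
        rw [hcol', hdropsame] at ih3 ih4
        rw [hset]
        refine ⟨ih1, ?_, ?_, ?_⟩
        · intro c' hc'
          rw [ih2 c' hc', colN_sset_other _ _ _ _ _ hc']
        · intro r hr
          rw [htkw] at hr
          simp only [List.length_cons] at hr
          have hrne : r ≠ r0 := by omega
          have : r < r0 + 1 ∨ r0 + 1 + (((colN H c.toNat).drop (r0+1)).takeWhile pvNH).length ≤ r := by
            omega
          rw [ih3 r this, getD_set_ne _ _ _ _ _ (by omega)]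
        · intro r hr1 hr2
          rw [htkw] at hr2
          simp only [List.length_cons] at hr2
          by_cases hrr : r = r0
          · subst hrr
            rw [ih3 r0 (Or.inl (by omega)), getD_set_self _ _ _ _ (by omega)]
            rw [hv]
            congr 1
            have : ((r0 : Int) - a ≤ cnt) = (y0 ≤ cnt) := by
              have : (r0 : Int) = a + y0 := by omega
              rw [this]
              congr 1
              omega
            rw [this]
          · exact ih4 r (by omega) (by omega)

-- segment data of a column of F below an anchor row a (a = -1 is the top anchor)
def segTW (F : List (List String)) (c : Nat) (a : Int) : List String :=
  ((colN F c).drop (a+1).toNat).takeWhile pvNH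

def eGN (F : List (List String)) (c : Nat) (a : Int) : Nat :=
  (a+1).toNat + (segTW F c a).length

def cntGN (F : List (List String)) (c : Nat) (a : Int) : Nat := countO (segTW F c a)

def CovA (F : List (List String)) (p : Int × Int) (r c : Nat) : Prop :=
  p.1 = (c : Int) ∧ p.2 + 1 ≤ (r : Int) ∧ r < eGN F c p.2

def AnchA (F : List (List String)) (n : Nat) (p : Int × Int) : Prop :=
  0 ≤ p.1 ∧ p.1.toNat < n ∧
    (p.2 = -1 ∨ (0 ≤ p.2 ∧ p.2.toNat < n ∧ (colN F p.1.toNat).getD p.2.toNat "" = "#"))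

def valA (F : List (List String)) (p : Int × Int) (r : Nat) : String :=
  if (r : Int) - p.2 ≤ (cntGN F p.1.toNat p.2 : Int) then "O" else "."

theorem getD_drop (l : List String) (s j : Nat) (d : String) :
    (l.drop s).getD j d = l.getD (s + j) d := by
  simp [List.getD_eq_getElem?_getD, List.getElem?_drop]

theorem tw_getD (l : List String) (j : Nat) (hj : j < (l.takeWhile pvNH).length) :
    (l.takeWhile pvNH).getD j "" = l.getD j "" := by
  have hpre := List.takeWhile_prefix (l := l) (p := pvNH)
  have hlen : (l.takeWhile pvNH).length ≤ l.length := List.IsPrefix.length_le hpre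
  rw [List.getD_eq_getElem _ _ hj, List.getD_eq_getElem _ _ (by omega)]
  exact List.IsPrefix.getElem hpre hj

theorem seg_nonhash (F : List (List String)) (c : Nat) (a : Int) (j : Nat)
    (h1 : (a+1).toNat ≤ j) (h2 : j < eGN F c a) : (colN F c).getD j "" ≠ "#" := by
  set s := (a+1).toNat with hs
  have h2' : j < s + (segTW F c a).length := by
    simp only [eGN] at h2
    omega
  have hj : j - s < (segTW F c a).length := by omega
  have hmem : (segTW F c a).getD (j - s) "" ∈ segTW F c a := by
    rw [List.getD_eq_getElem _ _ hj]
    exact List.getElem_mem hj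
  have hnh : pvNH ((segTW F c a).getD (j - s) "") := List.mem_takeWhile_imp hmem
  have heq : (segTW F c a).getD (j - s) "" = (colN F c).getD j "" := by
    rw [segTW, tw_getD _ _ hj, getD_drop]
    congr 1
    omega
  rw [heq] at hnh
  simpa [pvNH] using hnh

theorem takeWhile_len_congr (l1 l2 : List String) (hl : l1.length = l2.length)
    (h : ∀ j : Nat, j < l1.length → ((l1.getD j "" = "#") ↔ (l2.getD j "" = "#"))) :
    (l1.takeWhile pvNH).length = (l2.takeWhile pvNH).length := by
  induction l1 generalizing l2 with
  | nil =>
    have : l2 = [] := by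
      cases l2 with
      | nil => rfl
      | cons a l => simp at hl
    subst this; rfl
  | cons x tl ih =>
    cases l2 with
    | nil => simp at hl
    | cons y tl2 =>
      have h0 := h 0 (by simp)
      simp only [List.getD_cons_zero] at h0
      have htl := ih tl2 (by simpa using hl) (fun j hj => by
        have := h (j+1) (by simpa using Nat.succ_lt_succ hj)
        simpa using this)
      by_cases hx : x = "#"
      · have hy : y = "#" := h0.mp hx
        simp [List.takeWhile_cons, pvNH, hx, hy]
      · have hy : ¬ y = "#" := fun hy => hx (h0.mpr hy)
        simp [List.takeWhile_cons, pvNH, hx, hy, htl]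

theorem takeWhile_len_ge (l : List String) :
    ∀ (m : Nat), (∀ j : Nat, j < m → l.getD j "" ≠ "#") → m ≤ l.length →
      m ≤ (l.takeWhile pvNH).length := by
  induction l with
  | nil => intro m _ h; simpa using h
  | cons x tl ih =>
    intro m hm hlen
    cases m with
    | zero => simp
    | succ m' =>
      have hx : x ≠ "#" := by
        have := hm 0 (by omega)
        simpa using this
      rw [List.takeWhile_cons, if_pos (by simp only [pvNH, ne_eq, decide_eq_true_eq]; exact hx)]
      simp only [List.length_cons]
      have := ih m' (fun j hj => by
        have := hm (j+1) (by omega)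
        simpa using this) (by simpa using hlen)
      omega

theorem exists_anchor (col : List String) :
    ∀ (r : Nat), r < col.length → col.getD r "" ≠ "#" →
      ∃ s : Nat, s ≤ r ∧ (s = 0 ∨ col.getD (s-1) "" = "#") ∧
        (∀ j : Nat, s ≤ j → j ≤ r → col.getD j "" ≠ "#") := by
  intro r
  induction r with
  | zero =>
    intro _ h0
    exact ⟨0, le_refl 0, Or.inl rfl, fun j hj1 hj2 => by
      have : j = 0 := by omega
      subst this; exact h0⟩
  | succ r ih =>
    intro hr hne
    by_cases hprev : col.getD r "" = "#"
    · exact ⟨r+1, le_refl _, Or.inr (by simpa using hprev), fun j hj1 hj2 => by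
        have : j = r + 1 := by omega
        subst this; exact hne⟩
    · obtain ⟨s, hs1, hs2, hs3⟩ := ih (by omega) hprev
      exact ⟨s, by omega, hs2, fun j hj1 hj2 => by
        by_cases hj : j = r + 1
        · subst hj; exact hne
        · exact hs3 j hj1 (by omega)⟩

theorem anch_disjoint (F : List (List String)) (n : Nat) (p q : Int × Int) (r c : Nat)
    (hp : AnchA F n p) (hq : AnchA F n q) (h1 : CovA F p r c) (h2 : CovA F q r c) :
    p.2 = q.2 := by
  rcases lt_trichotomy p.2 q.2 with hlt | heq | hgt
  · exfalso
    have hq0 : 0 ≤ q.2 := by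
      rcases hp.2.2 with h | h
      · omega
      · omega
    have hqh : (colN F q.1.toNat).getD q.2.toNat "" = "#" := by
      rcases hq.2.2 with h | h
      · omega
      · exact h.2.2
    have hcc : q.1.toNat = c := by
      have := h2.1
      omega
    rw [hcc] at hqh
    exact seg_nonhash F c p.2 q.2.toNat (by have := h1.2.1; omega)
      (by have := h1.2.2; have := h2.2.1; omega) hqh
  · exact heq
  · exfalso
    have hp0 : 0 ≤ p.2 := by
      rcases hq.2.2 with h | h
      · omega
      · omega
    have hph : (colN F p.1.toNat).getD p.2.toNat "" = "#" := by
      rcases hp.2.2 with h | h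
      · omega
      · exact h.2.2
    have hcc : p.1.toNat = c := by
      have := h1.1
      omega
    rw [hcc] at hph
    exact seg_nonhash F c q.2 p.2.toNat (by have := h2.2.1; omega)
      (by have := h2.2.2; have := h1.2.1; omega) hph

theorem awpass (n : Nat) (F : List (List String)) (hF : SqN F n) :
    ∀ (L : List (Int × Int)) (H : List (List String)),
      (∀ p ∈ L, AnchA F n p) → SqN H n →
      (∀ r c : Nat, r < n → c < n → ((colN H c).getD r "" = "#" ↔ (colN F c).getD r "" = "#")) →
      (SqN (L.foldl (fun G p => pvWriteLoop (n : Int) p (cntGN F p.1.toNat p.2 : Int)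
          (PySem.List.pyRange 1 ((n : Int) + 1) 1) G) H) n ∧
       (∀ r c : Nat, r < n → c < n →
          (((colN (L.foldl (fun G p => pvWriteLoop (n : Int) p (cntGN F p.1.toNat p.2 : Int)
              (PySem.List.pyRange 1 ((n : Int) + 1) 1) G) H) c).getD r "" = "#") ↔
            ((colN F c).getD r "" = "#"))) ∧
       (∀ r c : Nat, r < n → c < n → (∀ p ∈ L, ¬ CovA F p r c) →
          (colN (L.foldl (fun G p => pvWriteLoop (n : Int) p (cntGN F p.1.toNat p.2 : Int)
            (PySem.List.pyRange 1 ((n : Int) + 1) 1) G) H) c).getD r "" = (colN H c).getD r "") ∧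
       (∀ r c : Nat, r < n → c < n → ∀ p ∈ L, CovA F p r c →
          (colN (L.foldl (fun G p => pvWriteLoop (n : Int) p (cntGN F p.1.toNat p.2 : Int)
            (PySem.List.pyRange 1 ((n : Int) + 1) 1) G) H) c).getD r "" = valA F p r)) := by
  intro L
  induction L with
  | nil =>
    intro H _ hH hhash
    simp only [List.foldl_nil]
    exact ⟨hH, hhash, by simp, by simp⟩
  | cons p0 L' ih =>
    intro H hanch hH hhash
    obtain ⟨pc, pa⟩ := p0
    have hp := hanch (pc, pa) (by simp)
    have hc0 : 0 ≤ pc := hp.1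
    have hcn : pc.toNat < n := hp.2.1
    have ha : -1 ≤ pa := by rcases hp.2.2 with h | h; omega; omega
    simp only [List.foldl_cons]
    obtain ⟨aw1, aw2, aw3, aw4⟩ := awrite n pc pa (cntGN F pc.toNat pa : Int) hc0 hcn ha
      n 1 H hH (by omega) (by omega) (by omega)
    have hHcl : (colN H pc.toNat).length = n := by rw [length_colN, hH.1]
    have hFcl : (colN F pc.toNat).length = n := by rw [length_colN, hF.1]
    have htk : (((colN H pc.toNat).drop (pa + 1).toNat).takeWhile pvNH).length =
        (segTW F pc.toNat pa).length := by
      rw [segTW]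
      apply takeWhile_len_congr
      · simp [hHcl, hFcl]
      · intro j hj
        rw [getD_drop, getD_drop]
        have hjn : (pa+1).toNat + j < n := by
          simp [hHcl] at hj
          omega
        exact hhash _ _ hjn hcn
    rw [show (pa + (1:Int)).toNat + (((colN H pc.toNat).drop (pa + 1).toNat).takeWhile pvNH).length
        = eGN F pc.toNat pa by rw [htk]; rfl] at aw3 aw4
    set G' := pvWriteLoop (n : Int) (pc, pa) (cntGN F pc.toNat pa : Int)
      (PySem.List.pyRange 1 ((n : Int) + 1) 1) H with hG'
    have hG'cell_out : ∀ r c : Nat, r < n → c < n → ¬ CovA F (pc, pa) r c →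
        (colN G' c).getD r "" = (colN H c).getD r "" := by
      intro r c hr hc hncov
      by_cases hcc : c = pc.toNat
      · subst hcc
        apply aw3
        rw [CovA] at hncov
        push_neg at hncov
        simp only at hncov
        have hne : ¬ ((pa + 1 ≤ (r:Int)) ∧ (r < eGN F pc.toNat pa)) := by
          intro hcon
          exact absurd (hncov (by omega) hcon.1) (by omega)
        omega
      · rw [aw2 c (by omega)]
    have hG'cell_in : ∀ r c : Nat, r < n → c < n → CovA F (pc, pa) r c →
        (colN G' c).getD r "" = valA F (pc, pa) r := by
      intro r c hr hc hcov
      have hcc : pc.toNat = c := by have := hcov.1; simp at this; omega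
      subst hcc
      rw [aw4 r (by have := hcov.2.1; simp at this; omega) (by exact hcov.2.2)]
      rw [valA]
    have hG'hash : ∀ r c : Nat, r < n → c < n →
        (((colN G' c).getD r "" = "#") ↔ ((colN F c).getD r "" = "#")) := by
      intro r c hr hc
      by_cases hcov : CovA F (pc, pa) r c
      · rw [hG'cell_in r c hr hc hcov]
        have hFnh : (colN F c).getD r "" ≠ "#" := by
          have hcc : pc.toNat = c := by have := hcov.1; simp at this; omega
          subst hcc
          exact seg_nonhash F pc.toNat pa r (by have := hcov.2.1; simp at this; omega) hcov.2.2
        constructor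
        · intro hcontra
          exfalso
          rw [valA] at hcontra
          by_cases hif : ((r : Int) - pa ≤ (cntGN F pc.toNat pa : Int))
          · rw [if_pos (by simpa using hif)] at hcontra; exact absurd hcontra (by decide)
          · rw [if_neg (by simpa using hif)] at hcontra; exact absurd hcontra (by decide)
        · intro h; exact absurd h hFnh
      · rw [hG'cell_out r c hr hc hcov]
        exact hhash r c hr hc
    obtain ⟨ih1, ih2, ih3, ih4⟩ := ih G' (fun q hq => hanch q (by simp [hq])) aw1 hG'hash
    refine ⟨ih1, ih2, ?_, ?_⟩
    · intro r c hr hc hncov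
      rw [ih3 r c hr hc (fun q hq => hncov q (by simp [hq]))]
      exact hG'cell_out r c hr hc (hncov (pc, pa) (by simp))
    · intro r c hr hc q hq hcov
      rcases List.mem_cons.mp hq with hq1 | hq2
      · subst hq1
        by_cases hex : ∃ q' ∈ L', CovA F q' r c
        · obtain ⟨q', hq'1, hq'2⟩ := hex
          rw [ih4 r c hr hc q' hq'1 hq'2]
          have hd := anch_disjoint F n (pc, pa) q' r c hp (hanch q' (by simp [hq'1])) hcov hq'2
          have hd1 : (pc, pa).1 = q'.1 := by
            have e1 := hcov.1
            have e2 := hq'2.1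
            simp at e1 ⊢
            omega
          obtain ⟨qc, qa⟩ := q'
          simp at hd hd1
          rw [valA, valA]
          simp only [hd, hd1]
        · push_neg at hex
          rw [ih3 r c hr hc hex]
          exact hG'cell_in r c hr hc hcov
      · exact ih4 r c hr hc q hq2 hcov

-- ---------- Part V : assembly ----------

def anchorsOf (F : List (List String)) : List (Int × Int) :=
  (PySem.List.pyRange 0 ((((PySem.List.pyGet? F 0).getD []).length : Int)) 1).map
      (fun x => (x, (-1 : Int)))
    ++ (PySem.List.enumerate F 0).flatMap (fun yl =>
         (PySem.List.enumerate yl.2 0).filterMap (fun xt =>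
           if xt.2 = "#" then some (xt.1, yl.1) else none))

def tiltA (F : List (List String)) : List (List String) :=
  ((anchorsOf F).zip ((anchorsOf F).map (fun pos =>
      pvCountLoop F (F.length : Int) pos (PySem.List.pyRange 1 ((F.length : Int) + 1) 1) 0))).foldl
    (fun G pc => pvWriteLoop (F.length : Int) pc.1 pc.2
      (PySem.List.pyRange 1 ((F.length : Int) + 1) 1) G) F

def obody (G : List (List String)) (x : Int) : List (List String) :=
  ((PySem.List.pyRange 0 ((G.length : Int)) 1).foldl (bbody x) (G, (0 : Int))).1

def tiltB (F : List (List String)) : List (List String) :=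
  (PySem.List.pyRange 0 ((((PySem.List.pyGet? F 0).getD []).length : Int)) 1).foldl obody F

theorem do_move_eq (f : List (List String)) (d : Int) :
    do_move f d = pvRots (tiltA (pvRots f d)) (4 - d) := rfl

theorem do_move_alt_eq (f : List (List String)) (d : Int) :
    do_move_alt f d = pvRots (tiltB (pvRots f d)) (4 - d) := rfl

theorem zip_self_map {α β : Type} (l : List α) (f : α → β) :
    l.zip (l.map f) = l.map (fun a => (a, f a)) := by
  induction l with
  | nil => rfl
  | cons x tl ih => simp [ih]

theorem cget_getElem (F : List (List String)) (r c : Nat) (hr : r < F.length)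
    (hc : c < F[r].length) : cget F r c = F[r][c] := by
  rw [cget, List.getD_eq_getElem _ _ hr, List.getD_eq_getElem _ _ hc]

theorem row0_len (F : List (List String)) (n : Nat) (hn : 0 < n) (hF : SqN F n) :
    ((PySem.List.pyGet? F 0).getD []).length = n := by
  have hlen : 0 < F.length := by rw [hF.1]; exact hn
  rw [PySem.List.pyGet?_zero, List.getElem?_eq_getElem hlen]
  exact hF.2 0 hlen

theorem mem_hashes (F : List (List String)) (c s : Nat) (hs : s < F.length)
    (hc : c < F[s].length) (hcell : F[s][c] = "#") :
    ((c : Int), (s : Int)) ∈ (PySem.List.enumerate F 0).flatMap (fun yl =>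
      (PySem.List.enumerate yl.2 0).filterMap (fun xt =>
        if xt.2 = "#" then some (xt.1, yl.1) else none)) := by
  apply List.mem_flatMap.mpr
  refine ⟨((s : Int), F[s]), ?_, ?_⟩
  · exact (PySem.List.mem_enumerate_iff _ _ _).mpr ⟨s, hs, by simp⟩
  · apply List.mem_filterMap.mpr
    refine ⟨((c : Int), F[s][c]), ?_, ?_⟩
    · exact (PySem.List.mem_enumerate_iff _ _ _).mpr ⟨c, hc, by simp⟩
    · rw [hcell]
      simp

theorem anchors_anch (F : List (List String)) (n : Nat) (hn : 0 < n) (hF : SqN F n) :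
    ∀ p ∈ anchorsOf F, AnchA F n p := by
  intro p hp
  rcases List.mem_append.mp hp with htop | hhash
  · obtain ⟨x, hx, hxp⟩ := List.mem_map.mp htop
    have hx' := PySem.List.mem_pyRange_one.mp hx
    rw [row0_len F n hn hF] at hx'
    refine ⟨by rw [← hxp]; exact hx'.1, by rw [← hxp]; simp; omega, ?_⟩
    left
    rw [← hxp]
  · obtain ⟨yl, hyl, hpl⟩ := List.mem_flatMap.mp hhash
    obtain ⟨k, hk, hylv⟩ := (PySem.List.mem_enumerate_iff _ _ _).mp hyl
    obtain ⟨xt, hxt, hxtv⟩ := List.mem_filterMap.mp hpl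
    subst hylv
    obtain ⟨j, hj, hxtv2⟩ := (PySem.List.mem_enumerate_iff _ _ _).mp hxt
    subst hxtv2
    simp only at hxtv hj
    by_cases hcond : F[k][j] = "#"
    · rw [if_pos hcond] at hxtv
      have hpv : p = ((j : Int), (k : Int)) := by
        rw [← Option.some_inj]
        rw [← hxtv]
        simp
      subst hpv
      have hrow : F[k].length = n := hF.2 k hk
      refine ⟨by simp, by simp; omega, ?_⟩
      right
      refine ⟨by simp, by simp [hF.1] at hk ⊢; omega, ?_⟩
      simp only [Int.toNat_natCast]
      rw [← cget_eq_colN, cget_getElem F k j hk hj, hcond]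
    · rw [if_neg hcond] at hxtv
      exact absurd hxtv (by simp)

theorem tiltA_spec (n : Nat) (F : List (List String)) (hn : 0 < n) (hF : SqN F n) :
    SqN (tiltA F) n ∧ ∀ r c : Nat, r < n → c < n →
      (colN (tiltA F) c).getD r "" = (tcol (colN F c)).getD r "" := by
  have hanch := anchors_anch F n hn hF
  have hcount : ∀ p ∈ anchorsOf F,
      pvCountLoop F (F.length : Int) p (PySem.List.pyRange 1 ((F.length : Int) + 1) 1) 0 =
        (cntGN F p.1.toNat p.2 : Int) := by
    intro p hp
    have hpa := hanch p hp
    have ha : -1 ≤ p.2 := by rcases hpa.2.2 with h | h; omega; omega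
    rw [hF.1]
    have := acount n F hF p.1 p.2 hpa.1 hpa.2.1 ha n 1 0 (by omega) (by omega)
    rw [show (p.2 + 1).toNat = (p.2 + 1).toNat from rfl] at this
    rw [this]
    simp [cntGN, segTW]
  have hfold : tiltA F = (anchorsOf F).foldl (fun G p => pvWriteLoop (n : Int) p
      (cntGN F p.1.toNat p.2 : Int) (PySem.List.pyRange 1 ((n : Int) + 1) 1) G) F := by
    rw [tiltA, zip_self_map, List.foldl_map, hF.1]
    apply PySem.List.foldl_congr_mem
    intro G p hp
    rw [← hF.1]
    rw [hcount p hp, hF.1]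
  obtain ⟨pw1, pw2, pw3, pw4⟩ := awpass n F hF (anchorsOf F) F hanch hF
    (fun r c _ _ => Iff.rfl)
  rw [← hfold] at pw1 pw2 pw3 pw4
  refine ⟨pw1, ?_⟩
  intro r c hr hc
  have hcoll : (colN F c).length = n := by rw [length_colN, hF.1]
  by_cases hcell : (colN F c).getD r "" = "#"
  · rw [tcol_getD_hash _ _ (by omega) hcell]
    rw [pw3 r c hr hc ?_, hcell]
    intro p hp hcov
    have hcc : p.1.toNat = c := by have := hcov.1; have := (hanch p hp).1; omega
    subst hcc
    exact absurd hcell (seg_nonhash F p.1.toNat p.2 r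
      (by have := hcov.2.1; have hpa := hanch p hp; rcases hpa.2.2 with h|h; omega; omega)
      hcov.2.2)
  · obtain ⟨s, hs1, hs2, hs3⟩ := exists_anchor (colN F c) r (by omega) hcell
    set p0 : Int × Int := ((c : Int), (s : Int) - 1) with hp0
    have hp0mem : p0 ∈ anchorsOf F := by
      rcases hs2 with hs0 | hsh
      · subst hs0
        apply List.mem_append_left
        apply List.mem_map.mpr
        refine ⟨(c : Int), ?_, by rw [hp0]; norm_num⟩
        apply PySem.List.mem_pyRange_one.mpr
        rw [row0_len F n hn hF]
        omega
      · apply List.mem_append_right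
        have hs1n : s - 1 < F.length := by rw [hF.1]; omega
        have hspos : 0 < s := by
          by_contra hc0
          have : s = 0 := by omega
          rw [this] at hsh
          exact hs3 0 (by omega) (by omega) (by simpa using hsh)
        have hrow : F[s-1].length = n := hF.2 (s-1) hs1n
        have hcell2 : F[s-1][c]'(by omega) = "#" := by
          rw [← cget_getElem F (s-1) c hs1n (by omega), cget_eq_colN]
          exact hsh
        have := mem_hashes F c (s-1) hs1n (by omega) hcell2
        rw [show (((s-1 : Nat)) : Int) = (s : Int) - 1 by omega] at this
        exact this
    have hcov : CovA F p0 r c := by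
      refine ⟨rfl, by rw [hp0]; simp; omega, ?_⟩
      have he : eGN F c ((s:Int) - 1) = s + (segTW F c ((s:Int)-1)).length := by
        rw [eGN]
        congr 1
        omega
      rw [he]
      have hts : ((s:Int) - 1 + 1).toNat = s := by omega
      have hge := takeWhile_len_ge ((colN F c).drop s) (r - s + 1) (fun j hj => by
        rw [getD_drop]
        exact hs3 (s + j) (by omega) (by omega)) (by simp [hcoll]; omega)
      rw [segTW, hts]
      omega
    rw [pw4 r c hr hc p0 hp0mem hcov]
    rw [tcol_getD_seg (colN F c) r s hs1 (by omega) hs2 hs3]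
    rw [valA]
    have hcnt : cntGN F p0.1.toNat p0.2 = countO (((colN F c).drop s).takeWhile pvNH) := by
      rw [hp0]
      show cntGN F ((c : Int)).toNat ((s : Int) - 1) = _
      rw [cntGN, segTW]
      rw [show ((s : Int) - 1 + 1).toNat = s by omega, show ((c : Int)).toNat = c by omega]
    rw [hcnt]
    have hiff : ((r : Int) - p0.2 ≤ (countO (((colN F c).drop s).takeWhile pvNH) : Int)) ↔
        (r - s < countO (((colN F c).drop s).takeWhile pvNH)) := by
      rw [hp0]
      simp
      omega
    rw [if_congr hiff rfl rfl]

-- B outer loop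
theorem bouter (n : Nat) (F : List (List String)) (hF : SqN F n) :
    ∀ (k : Nat) (x : Int) (G : List (List String)), x = (n : Int) - (k : Int) → 0 ≤ x →
      SqN G n →
      (∀ c : Nat, c < x.toNat → colN G c = tcol (colN F c)) →
      (∀ c : Nat, x.toNat ≤ c → c < n → colN G c = colN F c) →
      (SqN ((PySem.List.pyRange x (n : Int) 1).foldl obody G) n ∧
       ∀ c : Nat, c < n →
         colN ((PySem.List.pyRange x (n : Int) 1).foldl obody G) c = tcol (colN F c)) := by
  intro k
  induction k with
  | zero =>
    intro x G hx hx0 hG h1 h2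
    rw [PySem.List.pyRange_one_eq_nil (by omega)]
    simp only [List.foldl_nil]
    exact ⟨hG, fun c hcn => h1 c (by omega)⟩
  | succ k ih =>
    intro x G hx hx0 hG h1 h2
    have hxn : x < (n : Int) := by omega
    rw [PySem.List.pyRange_one_cons (by omega)]
    simp only [List.foldl_cons]
    obtain ⟨b1, b2, b3⟩ := binnerB n x hx0 (by omega) n G 0 0 hG (by omega) (by omega)
      (by omega) (fun j hj1 hj2 => absurd hj2 (by omega))
    have hob : obody G x = ((PySem.List.pyRange 0 ((n : Int)) 1).foldl (bbody x) (G, (0:Int))).1 := by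
      rw [obody, hG.1]
    rw [← hob] at b1 b2 b3
    simp only [Int.toNat_zero, List.take_zero, List.drop_zero, List.nil_append] at b2
    obtain ⟨ih1, ih2⟩ := ih (x + 1) (obody G x) (by omega) (by omega) b1
      (fun c hcx => by
        by_cases hcc : c = x.toNat
        · subst hcc
          rw [b2, h2 x.toNat (by omega) (by omega)]
        · rw [b3 c hcc, h1 c (by omega)])
      (fun c hcx hcn => by
        rw [b3 c (by omega), h2 c (by omega) hcn])
    exact ⟨ih1, ih2⟩

theorem tiltB_spec (n : Nat) (F : List (List String)) (hn : 0 < n) (hF : SqN F n) :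
    SqN (tiltB F) n ∧ ∀ c : Nat, c < n → colN (tiltB F) c = tcol (colN F c) := by
  rw [tiltB, row0_len F n hn hF]
  exact bouter n F hF n 0 F (by omega) (by omega) hF (by omega) (fun c _ _ => rfl)

-- the two tilts agree on non-empty square grids
theorem tilt_eq (n : Nat) (F : List (List String)) (hn : 0 < n) (hF : SqN F n) :
    tiltA F = tiltB F := by
  obtain ⟨ha1, ha2⟩ := tiltA_spec n F hn hF
  obtain ⟨hb1, hb2⟩ := tiltB_spec n F hn hF
  apply cget_colN_ext ha1 hb1
  intro c hc
  rw [hb2 c hc]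
  apply List.ext_getElem (by rw [length_colN, length_tcol, length_colN, ha1.1, hF.1])
  intro r hr1 hr2
  have hrn : r < n := by rw [length_colN, ha1.1] at hr1; exact hr1
  rw [← List.getD_eq_getElem _ "" hr1, ← List.getD_eq_getElem _ "" hr2]
  exact ha2 r c hrn hc

-- rotations preserve the rectangular shape
def RectN (F : List (List String)) (n m : Nat) : Prop :=
  F.length = n ∧ ∀ (i : Nat) (h : i < F.length), F[i].length = m

theorem pvRot_rect (F : List (List String)) (n m : Nat) (h : RectN F n m) :
    RectN (pvRot F) n m := by
  have hlen : (pvRot F).length = F.length := by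
    simp [pvRot, PySem.List.length_enumerate]
  refine ⟨by rw [hlen, h.1], ?_⟩
  intro i hi
  have hiF : i < F.length := by rw [hlen] at hi; exact hi
  have : (pvRot F)[i] = (PySem.List.pyRange 0 ((F[i].length : Int)) 1).map
      (fun x => pvCell F x ((F.length : Int) - (0 + (i : Int)) - 1)) := by
    simp only [pvRot]
    rw [List.getElem_map, PySem.List.getElem_enumerate]
  rw [this]
  simp [PySem.List.length_pyRange_one]
  exact h.2 i hiF

theorem pvRots_rect (F : List (List String)) (n m : Nat) (k : Int) (h : RectN F n m) :
    RectN (pvRots F k) n m := by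
  rw [pvRots]
  induction PySem.List.pyRange 0 k 1 generalizing F with
  | nil => simpa using h
  | cons y ys ih =>
    simp only [List.foldl_cons]
    exact ih (pvRot F) (pvRot_rect F n m h)

-- degenerate case: every row empty
theorem hashes_nil (f : (Int × List String) → (Int × String) → Option (Int × Int)) :
    ∀ (F : List (List String)) (s : Int), (∀ row ∈ F, row = []) →
      (PySem.List.enumerate F s).flatMap (fun yl =>
        (PySem.List.enumerate yl.2 0).filterMap (f yl)) = [] := by
  intro F
  induction F with
  | nil => intro s _; simp [PySem.List.enumerate_nil]
  | cons row tl ih =>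
    intro s hrows
    rw [PySem.List.enumerate_cons]
    simp only [List.flatMap_cons]
    rw [hrows row (by simp)]
    rw [ih (s+1) (fun r hr => hrows r (by simp [hr]))]
    simp [PySem.List.enumerate_nil]

theorem row0_empty (F : List (List String)) (hne : F ≠ []) (hrows : ∀ row ∈ F, row = []) :
    ((PySem.List.pyGet? F 0).getD []).length = 0 := by
  cases F with
  | nil => exact absurd rfl hne
  | cons r tl =>
    rw [PySem.List.pyGet?_zero]
    simp only [List.getElem?_cons_zero, Option.getD_some]
    rw [hrows r (by simp)]
    rfl

theorem anchors_empty (F : List (List String)) (hne : F ≠ []) (hrows : ∀ row ∈ F, row = []) :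
    anchorsOf F = [] := by
  rw [anchorsOf]
  rw [show ((((PySem.List.pyGet? F 0).getD []).length : Nat) : Int) = 0 by
    rw [row0_empty F hne hrows]; rfl]
  rw [PySem.List.pyRange_one_eq_nil (by omega)]
  rw [hashes_nil _ F 0 hrows]
  rfl

theorem tiltA_empty (F : List (List String)) (hne : F ≠ []) (hrows : ∀ row ∈ F, row = []) :
    tiltA F = F := by
  rw [tiltA, anchors_empty F hne hrows]
  rfl

theorem tiltB_empty (F : List (List String)) (hne : F ≠ []) (hrows : ∀ row ∈ F, row = []) :
    tiltB F = F := by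
  rw [tiltB]
  rw [show ((((PySem.List.pyGet? F 0).getD []).length : Nat) : Int) = 0 by
    rw [row0_empty F hne hrows]; rfl]
  rw [PySem.List.pyRange_one_eq_nil (by omega)]
  rfl


-- ===== VERDICT (by name: the statement is the Claim_ definition above) =====
theorem do_move_spec : Claim_equal_do_move := by
  intro field direc hdom hpre
  show do_move field direc = do_move_alt field direc
  rw [do_move_eq, do_move_alt_eq]
  congr 1
  obtain ⟨hne, hcase⟩ := hpre
  have hn : 0 < field.length := by
    cases field with
    | nil => exact absurd rfl hne
    | cons a l => simp
  rcases hcase with hemp | hsq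
  · have hrect : RectN field field.length 0 :=
      ⟨rfl, fun i hi => by rw [hemp field[i] (List.getElem_mem hi)]; rfl⟩
    have hrect' : RectN (pvRots field direc) field.length 0 :=
      pvRots_rect field field.length 0 direc hrect
    have hne' : pvRots field direc ≠ [] := by
      intro hcon
      have := hrect'.1
      rw [hcon] at this
      simp at this
      omega
    have hrows' : ∀ row ∈ pvRots field direc, row = [] := by
      intro row hrow
      obtain ⟨i, hi, hrv⟩ := List.mem_iff_getElem.mp hrow
      rw [← hrv]
      exact List.eq_nil_of_length_eq_zero (hrect'.2 i hi)
    rw [tiltA_empty _ hne' hrows', tiltB_empty _ hne' hrows']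
  · have hsq : SqN field field.length :=
      ⟨rfl, fun i hi => hsq field[i] (List.getElem_mem hi)⟩
    have hsq' : SqN (pvRots field direc) field.length :=
      pvRots_rect field field.length field.length direc hsq
    exact tilt_eq field.length (pvRots field direc) hn hsq'
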